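-- pv_equiv track=rewrite | github.com/Spadazzoni/Aperiodic-Lattice-Spectra | PeriodDoublingLattice.py | NewPeriodDoubling
-- ===== SOURCE A (Python) =====
-- def NewPeriodDoubling(Seed, NumberOfSubstitutions):
--     Lattice = []
--     NewList = []
--     if len(Seed.split(",")) == 1:
--         for i in range(NumberOfSubstitutions):
--             if i == 0:
--                 if Seed == "0":
--                     Lattice.extend([0, 1])
--                 if Seed == "1":
--                     Lattice.extend([0, 0])
--             if i > 0:
--                 for item in Lattice:
--                     if item == 0:
--                         NewList.extend([0, 1])
--                     if item == 1:
--                         NewList.extend([0, 0])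
--                 Lattice = NewList
--                 NewList = []
--     elif len(Seed.split(",")) == 2:
--         LeftLattice = NewPeriodDoubling(Seed.split(",")[0], NumberOfSubstitutions)
--         ShortenedLeftLattice = LeftLattice[int(0.9 * len(LeftLattice)) :]
--         RightLattice = NewPeriodDoubling(Seed.split(",")[1], NumberOfSubstitutions)
--         Lattice = ShortenedLeftLattice + RightLattice
--     return Lattice
-- ===== SOURCE B (Python) =====
-- def _single(seed, n):
--     # period-doubling word via the doubling identity w -> w + w[:-1] + [1 - w[-1]]
--     if n <= 0 or seed not in ("0", "1"):
--         return []
--     w = [0]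
--     for _ in range(n - 1 if seed == "1" else n):
--         w = w + w[:-1] + [1 - w[-1]]
--     return w + w if seed == "1" else w
--
--
-- def NewPeriodDoubling(Seed, NumberOfSubstitutions):
--     parts = Seed.split(",")
--     if len(parts) == 1:
--         return _single(Seed, NumberOfSubstitutions)
--     if len(parts) == 2:
--         left = _single(parts[0], NumberOfSubstitutions)
--         return left[int(0.9 * len(left)):] + _single(parts[1], NumberOfSubstitutions)
--     return []
-- ===== Notes on version B (the rewrite author's own statement) =====
-- stated objective: alternative
-- what changed: B drops A's recursion and level-by-level substitution rebuilding entirely: a non-recursive top level splits the seed once, and a helper builds the period-doubling word by the iterated doubling identity w -> w + w[:-1] + [1 - w[-1]] starting from [0] (seed '1' returns w + w at one less depth), instead of mapping the substitution 0->01, 1->00 over every intermediate level.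
import Mathlib
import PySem

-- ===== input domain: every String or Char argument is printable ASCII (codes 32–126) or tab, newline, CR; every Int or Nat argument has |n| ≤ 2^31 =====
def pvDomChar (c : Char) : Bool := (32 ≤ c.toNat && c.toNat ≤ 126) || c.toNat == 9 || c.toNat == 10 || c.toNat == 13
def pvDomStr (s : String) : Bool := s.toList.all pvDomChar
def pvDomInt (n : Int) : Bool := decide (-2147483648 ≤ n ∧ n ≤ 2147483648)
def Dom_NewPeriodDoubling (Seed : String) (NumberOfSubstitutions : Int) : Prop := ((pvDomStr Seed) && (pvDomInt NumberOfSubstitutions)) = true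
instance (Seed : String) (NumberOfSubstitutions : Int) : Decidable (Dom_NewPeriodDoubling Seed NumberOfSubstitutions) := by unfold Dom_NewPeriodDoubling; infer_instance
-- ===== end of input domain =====

-- B drops A's recursion and level rebuilding: a non-recursive top level and an iterated
-- doubling w -> w + w[:-1] + [1 - w[-1]] build the word (objective: alternative).

-- ===== PORT A =====

-- int(0.9 * L) for the list lengths this program produces (0 and powers of two, for which
-- 0.9 * float(L) is exactly the IEEE double 8106479329266893/2^53 times L):
-- floor(8106479329266893 * L / 2^53).  Exact float semantics of A's (and B's) slice index.
def pvInt09 (n : Nat) : Int := Int.ofNat (8106479329266893 * n / 9007199254740992)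

-- termination facts A's recursion cites: the pieces of splitOn · [','] contain no ','
-- and a 2-piece split needs a ',' in the input, so each recursive call drops a comma.
theorem pvSplitGo_no_comma (fuel : Nat) : ∀ (l cur : List Char) (acc : List (List Char)),
    l.length < fuel → (∀ p ∈ acc, ',' ∉ p) → ',' ∉ cur →
    ∀ p ∈ PySem.Chars.splitOn.go [','] fuel l cur acc, ',' ∉ p := by
  induction fuel with
  | zero => intro l cur acc h; omega
  | succ f ih =>
    intro l cur acc hl hacc hcur
    cases l with
    | nil =>
      intro p hp
      simp [PySem.Chars.splitOn.go] at hp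
      rcases hp with h | h
      · exact hacc p h
      · subst h; simpa using hcur
    | cons c rest =>
      simp only [PySem.Chars.splitOn.go]
      by_cases hpre : [','].isPrefixOf (c :: rest) = true
      · simp only [hpre, if_true]
        apply ih
        · simp at hl ⊢; omega
        · intro p hp
          rcases List.mem_cons.1 hp with h | h
          · subst h; simpa using hcur
          · exact hacc p h
        · simp
      · simp only [hpre]
        apply ih
        · simp at hl ⊢; omega
        · exact hacc
        · intro hc
          rcases List.mem_cons.1 hc with h | h
          · apply hpre; subst h; simp [List.isPrefixOf]
          · exact hcur h

theorem pvSplitOn_no_comma (cs : List Char) :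
    ∀ p ∈ PySem.Chars.splitOn cs [','], ',' ∉ p := by
  unfold PySem.Chars.splitOn
  exact pvSplitGo_no_comma (cs.length + 1) cs [] [] (by omega) (by simp) (by simp)

theorem pvSplitGo_no_sep (fuel : Nat) : ∀ (l cur : List Char) (acc : List (List Char)),
    l.length < fuel → ',' ∉ l →
    PySem.Chars.splitOn.go [','] fuel l cur acc = ((cur.reverse ++ l) :: acc).reverse := by
  induction fuel with
  | zero => intro l cur acc h; omega
  | succ f ih =>
    intro l cur acc hl hcomma
    cases l with
    | nil => simp [PySem.Chars.splitOn.go]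
    | cons c rest =>
      have hc : c ≠ ',' := fun h => hcomma (by simp [h])
      have hpre : [','].isPrefixOf (c :: rest) = false := by
        simp [List.isPrefixOf]; exact fun h => hc h.symm
      simp only [PySem.Chars.splitOn.go, hpre, Bool.false_eq_true, if_false]
      rw [ih rest (c :: cur) acc (by simp at hl ⊢; omega) (fun h => hcomma (by simp [h]))]
      simp

theorem pvSplitOn_of_no_comma {cs : List Char} (h : ',' ∉ cs) :
    PySem.Chars.splitOn cs [','] = [cs] := by
  unfold PySem.Chars.splitOn
  rw [pvSplitGo_no_sep (cs.length + 1) cs [] [] (by omega) h]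
  simp

theorem pvSplit_part_count {cs p : List Char}
    (h2 : (PySem.Chars.splitOn cs [',']).length = 2)
    (hp : p ∈ PySem.Chars.splitOn cs [',']) :
    p.count ',' < cs.count ',' := by
  have hp0 : p.count ',' = 0 := List.count_eq_zero.2 (pvSplitOn_no_comma cs p hp)
  have hcs : ',' ∈ cs := by
    by_contra h
    rw [pvSplitOn_of_no_comma h] at h2
    simp at h2
  have := List.count_pos_iff.2 hcs
  omega

-- the body of the 'for item in Lattice' inner loop of A
def pvStepItem (nl : List Int) (item : Int) : List Int :=
  let nl := if item = 0 then nl ++ [0, 1] else nl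
  if item = 1 then nl ++ [0, 0] else nl

-- the body of the 'for i in range(NumberOfSubstitutions)' loop of A; state = (Lattice, NewList)
def pvStepIter (cs : List Char) (st : List Int × List Int) (i : Int) : List Int × List Int :=
  let Lattice := st.1
  let NewList := st.2
  let Lattice :=
    if i = 0 then
      let Lattice := if cs = ['0'] then Lattice ++ [0, 1] else Lattice
      if cs = ['1'] then Lattice ++ [0, 0] else Lattice
    else Lattice
  if 0 < i then
    let NewList := Lattice.foldl pvStepItem NewList
    (NewList, [])
  else (Lattice, NewList)

-- A on the char list of Seed (strings are ported through List Char; Seed.split(",") is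
-- PySem.Chars.splitOn, indexed under the branch's length hypothesis as Python does)
def pvNPDA (cs : List Char) (N : Int) : List Int :=
  if _h1 : (PySem.Chars.splitOn cs [',']).length = 1 then
    ((PySem.List.pyRange 0 N 1).foldl (pvStepIter cs) ([], [])).1
  else if h2 : (PySem.Chars.splitOn cs [',']).length = 2 then
    let LeftLattice := pvNPDA ((PySem.Chars.splitOn cs [','])[0]'(by omega)) N
    let ShortenedLeftLattice := PySem.List.slice LeftLattice (some (pvInt09 LeftLattice.length)) none
    let RightLattice := pvNPDA ((PySem.Chars.splitOn cs [','])[1]'(by omega)) N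
    ShortenedLeftLattice ++ RightLattice
  else []
termination_by cs.count ','
decreasing_by
  · exact pvSplit_part_count h2 (List.getElem_mem _)
  · exact pvSplit_part_count h2 (List.getElem_mem _)

def NewPeriodDoubling (Seed : String) (NumberOfSubstitutions : Int) : List Int :=
  pvNPDA Seed.toList NumberOfSubstitutions

-- ===== PORT B =====

-- _single(seed, n) of Source B: builds the period-doubling word by iterated doubling
-- w -> w + w[:-1] + [1 - w[-1]] from [0] (w[:-1] is PySem.List.slice · none (some (-1)),
-- w[-1] is PySem.List.pyGetD · (-1); w is never empty so the default 0 is never read);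
-- range(m) over the nonnegative m is List.range.
def pvSingleB (seed : List Char) (n : Int) : List Int :=
  if n ≤ 0 ∨ ¬(seed = ['0'] ∨ seed = ['1']) then []
  else
    let m : Nat := if seed = ['1'] then (n - 1).toNat else n.toNat
    let w := (List.range m).foldl
      (fun w _ => w ++ PySem.List.slice w none (some (-1)) ++ [1 - PySem.List.pyGetD w (-1) 0])
      [0]
    if seed = ['1'] then w ++ w else w

-- NewPeriodDoubling of Source B: split once, no recursion
def NewPeriodDoubling_alt (Seed : String) (NumberOfSubstitutions : Int) : List Int :=
  let parts := PySem.Chars.splitOn Seed.toList [',']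
  if parts.length = 1 then pvSingleB Seed.toList NumberOfSubstitutions
  else if h2 : parts.length = 2 then
    let left := pvSingleB (parts[0]'(by omega)) NumberOfSubstitutions
    PySem.List.slice left (some (pvInt09 left.length)) none ++
      pvSingleB (parts[1]'(by omega)) NumberOfSubstitutions
  else []

-- ===== PRECONDITION & SPEC =====
def Spec_NewPeriodDoubling (Seed : String) (NumberOfSubstitutions : Int) (out : List Int) : Prop := out = NewPeriodDoubling_alt Seed NumberOfSubstitutions
instance (Seed : String) (NumberOfSubstitutions : Int) (out : List Int) : Decidable (Spec_NewPeriodDoubling Seed NumberOfSubstitutions out) := by unfold Spec_NewPeriodDoubling; infer_instance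

-- ===== CLAIM =====
def Claim_equal_NewPeriodDoubling : Prop := ∀ (Seed : String) (NumberOfSubstitutions : Int), Dom_NewPeriodDoubling Seed NumberOfSubstitutions → Spec_NewPeriodDoubling Seed NumberOfSubstitutions (NewPeriodDoubling Seed NumberOfSubstitutions)

-- ===== LEMMAS AND PROOFS =====

-- proof-side expansion tree: eA s d = the depth-d substitution image of symbol s
def eA (s : Int) (d : Nat) : List Int :=
  match d with
  | 0 => [s]
  | d + 1 => if s = 0 then eA 0 d ++ eA 1 d else eA 0 d ++ eA 0 d

theorem eA_ne_nil (s : Int) (d : Nat) : eA s d ≠ [] := by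
  cases d with
  | zero => simp [eA]
  | succ d => unfold eA; split <;> simp [eA_ne_nil 0 d]

-- A's inner loop body appends the substitution image of the item
def pvRule (item : Int) : List Int :=
  if item = 0 then [0, 1] else if item = 1 then [0, 0] else []

theorem pvStepItem_eq (nl : List Int) (item : Int) : pvStepItem nl item = nl ++ pvRule item := by
  unfold pvStepItem pvRule
  split_ifs <;> simp_all

theorem pvMapstep_eq (L : List Int) : L.foldl pvStepItem [] = L.flatMap pvRule := by
  have h : pvStepItem = fun nl item => nl ++ pvRule item := funext fun nl => funext (pvStepItem_eq nl)
  rw [h, PySem.List.foldl_append_eq_flatMap]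
  simp

-- one application of A's rebuilding loop advances the expansion depth by one
theorem pvFlatMap_expand (s : Int) (hs : s = 0 ∨ s = 1) (d : Nat) :
    (eA s d).flatMap pvRule = eA s (d + 1) := by
  induction d generalizing s with
  | zero => rcases hs with h | h <;> subst h <;> simp [eA, pvRule]
  | succ d ih =>
    rcases hs with h | h <;> subst h <;>
      simp [eA, List.flatMap_append, ih 0 (Or.inl rfl), ih 1 (Or.inr rfl)]

theorem pvIterate (cs : List Char) (k : Nat) : ∀ (a : Int), 1 ≤ a → ∀ (L : List Int),
    (PySem.List.pyRange a (a + k) 1).foldl (pvStepIter cs) (L, []) =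
      ((fun L => L.foldl pvStepItem [])^[k] L, []) := by
  induction k with
  | zero =>
    intro a ha L
    have h : PySem.List.pyRange a (a + (0:Nat)) 1 = [] := by norm_num
    rw [h]; rfl
  | succ k ih =>
    intro a ha L
    rw [PySem.List.pyRange_one_cons (by omega : a < a + (k + 1 : Nat))]
    have hstep : pvStepIter cs (L, []) a = (L.foldl pvStepItem [], []) := by
      unfold pvStepIter
      simp [show ¬(a = 0) by omega, show (0:Int) < a by omega]
    rw [List.foldl_cons, hstep]
    have harg : (a + 1) + (k : Int) = a + ((k + 1 : Nat) : Int) := by push_cast; ring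
    rw [show (a + ((k+1:Nat):Int)) = (a + 1) + (k:Int) from harg.symm]
    rw [ih (a+1) (by omega) (L.foldl pvStepItem [])]
    rw [Function.iterate_succ_apply]

theorem pvIter_expand (s : Int) (hs : s = 0 ∨ s = 1) (k : Nat) :
    (fun L => L.foldl pvStepItem [])^[k] (eA s 1) = eA s (k + 1) := by
  induction k with
  | zero => rfl
  | succ k ih =>
    rw [Function.iterate_succ_apply', ih]
    rw [pvMapstep_eq, pvFlatMap_expand s hs (k + 1)]

theorem pvIter_nil (k : Nat) : (fun L => L.foldl pvStepItem [])^[k] ([] : List Int) = [] := by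
  induction k with
  | zero => rfl
  | succ k ih => rw [Function.iterate_succ_apply', ih]; rfl

-- A's single-symbol branch computes the expansion tree value
theorem pvA_branch (cs : List Char) (N : Int) :
    ((PySem.List.pyRange 0 N 1).foldl (pvStepIter cs) ([], [])).1 =
      (if N ≤ 0 ∨ ¬(cs = ['0'] ∨ cs = ['1']) then []
       else eA (if cs = ['1'] then 1 else 0) N.toNat) := by
  by_cases hN : N ≤ 0
  · have h : PySem.List.pyRange 0 N 1 = [] := by
      simp [PySem.List.pyRange]; omega
    rw [h]
    simp [hN]
  · rw [PySem.List.pyRange_one_cons (by omega : (0:Int) < N)]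
    rw [List.foldl_cons]
    have hstep : pvStepIter cs (([] : List Int), ([] : List Int)) 0 =
        ((if cs = ['0'] then [0, 1] else if cs = ['1'] then [0, 0] else []), []) := by
      unfold pvStepIter
      by_cases h0 : cs = ['0'] <;> by_cases h1 : cs = ['1'] <;> simp_all
    rw [hstep]
    set k := (N - 1).toNat with hk
    have hN' : N = 1 + (k : Int) := by omega
    have h2 : PySem.List.pyRange (0+1) N 1 = PySem.List.pyRange 1 (1 + (k:Int)) 1 := by
      norm_num [← hN']
    rw [h2]
    rw [pvIterate cs k 1 le_rfl]
    have hkN : k + 1 = N.toNat := by omega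
    by_cases h0 : cs = ['0']
    · subst h0
      rw [if_pos rfl]
      rw [show ([0,1] : List Int) = eA 0 1 by rfl]
      rw [pvIter_expand 0 (Or.inl rfl) k, hkN]
      simp [show ¬(N ≤ 0) by omega]
    · by_cases h1 : cs = ['1']
      · subst h1
        rw [if_neg (by decide : ¬(['1'] : List Char) = ['0']), if_pos rfl]
        rw [show ([0,0] : List Int) = eA 1 1 by rfl]
        rw [pvIter_expand 1 (Or.inr rfl) k, hkN]
        simp [show ¬(N ≤ 0) by omega]
      · rw [if_neg h0, if_neg h1]
        rw [pvIter_nil k]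
        simp [h0, h1]

theorem pvGetLastD_append {a b : List Int} (hb : b ≠ []) :
    (a ++ b).getLastD 0 = b.getLastD 0 := by
  cases h : b.getLast? with
  | none => exact absurd (List.getLast?_eq_none_iff.1 h) hb
  | some x => simp [List.getLastD_eq_getLast?, List.getLast?_append, h]

-- flipping the last symbol of one expansion gives the other expansion
theorem pvFlip_expand (d : Nat) :
    ((eA 0 d).dropLast ++ [1 - (eA 0 d).getLastD 0] = eA 1 d) ∧
    ((eA 1 d).dropLast ++ [1 - (eA 1 d).getLastD 0] = eA 0 d) := by
  induction d with
  | zero => constructor <;> simp [eA]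
  | succ d ih =>
    have h0 : eA 0 (d+1) = eA 0 d ++ eA 1 d := by simp [eA]
    have h1 : eA 1 (d+1) = eA 0 d ++ eA 0 d := by simp [eA]
    have hD0 : (eA 0 d ++ eA 1 d).dropLast = eA 0 d ++ (eA 1 d).dropLast :=
      List.dropLast_append_of_ne_nil (eA_ne_nil 1 d)
    have hD1 : (eA 0 d ++ eA 0 d).dropLast = eA 0 d ++ (eA 0 d).dropLast :=
      List.dropLast_append_of_ne_nil (eA_ne_nil 0 d)
    have hL0 : (eA 0 d ++ eA 1 d).getLastD 0 = (eA 1 d).getLastD 0 :=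
      pvGetLastD_append (eA_ne_nil 1 d)
    have hL1 : (eA 0 d ++ eA 0 d).getLastD 0 = (eA 0 d).getLastD 0 :=
      pvGetLastD_append (eA_ne_nil 0 d)
    constructor
    · rw [h0, h1, hD0, hL0, List.append_assoc, ih.2]
    · rw [h0, h1, hD1, hL1, List.append_assoc, ih.1]

-- one doubling step of B, on an expansion word
theorem pvDbl_expand (d : Nat) :
    eA 0 d ++ PySem.List.slice (eA 0 d) none (some (-1)) ++
      [1 - PySem.List.pyGetD (eA 0 d) (-1) 0] = eA 0 (d + 1) := by
  have hget : PySem.List.pyGetD (eA 0 d) (-1) 0 = (eA 0 d).getLastD 0 := by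
    rw [PySem.List.pyGetD_neg_one (eA 0 d) 0 (eA_ne_nil 0 d)]
    simp [List.getLastD_eq_getLast?, List.getLast?_eq_getLast_of_ne_nil (eA_ne_nil 0 d)]
  rw [PySem.List.slice_to_neg_one, hget, List.append_assoc, (pvFlip_expand d).1]
  simp [eA]

-- B's doubling loop builds the expansion of 0
theorem pvLoopB (m : Nat) :
    (List.range m).foldl
      (fun w _ => w ++ PySem.List.slice w none (some (-1)) ++ [1 - PySem.List.pyGetD w (-1) 0])
      [0] = eA 0 m := by
  induction m with
  | zero => rfl
  | succ m ih =>
    rw [List.range_succ, List.foldl_append, ih]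
    simpa using pvDbl_expand m

-- B's _single also computes the expansion tree value
theorem pvB_single (cs : List Char) (N : Int) :
    pvSingleB cs N =
      (if N ≤ 0 ∨ ¬(cs = ['0'] ∨ cs = ['1']) then []
       else eA (if cs = ['1'] then 1 else 0) N.toNat) := by
  unfold pvSingleB
  by_cases hg : N ≤ 0 ∨ ¬(cs = ['0'] ∨ cs = ['1'])
  · rw [if_pos hg, if_pos hg]
  · have hh := not_or.1 hg
    have hN : 0 < N := by omega
    rw [if_neg hg, if_neg hg]
    simp only [pvLoopB]
    by_cases h1 : cs = ['1']
    · simp only [if_pos h1]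
      have hkN : (N - 1).toNat + 1 = N.toNat := by omega
      rw [← hkN]
      simp [eA]
    · simp only [if_neg h1]

-- on a comma-free seed A takes the single-symbol branch and agrees with B's _single
theorem pvNPD_single {p : List Char} (hp : ',' ∉ p) (N : Int) : pvNPDA p N = pvSingleB p N := by
  have hs := pvSplitOn_of_no_comma hp
  rw [pvNPDA]
  rw [dif_pos (by rw [hs]; rfl)]
  rw [pvA_branch, pvB_single]

theorem pvNPDA_eq_alt (Seed : String) (N : Int) :
    pvNPDA Seed.toList N = NewPeriodDoubling_alt Seed N := by
  unfold NewPeriodDoubling_alt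
  rw [pvNPDA]
  by_cases h1 : (PySem.Chars.splitOn Seed.toList [',']).length = 1
  · rw [dif_pos h1, if_pos h1, pvA_branch, pvB_single]
  · by_cases h2 : (PySem.Chars.splitOn Seed.toList [',']).length = 2
    · rw [dif_neg h1, if_neg h1, dif_pos h2, dif_pos h2,
        pvNPD_single (pvSplitOn_no_comma Seed.toList _ (List.getElem_mem _)) N,
        pvNPD_single (pvSplitOn_no_comma Seed.toList _ (List.getElem_mem _)) N]
    · rw [dif_neg h1, if_neg h1, dif_neg h2, dif_neg h2]

-- ===== VERDICT =====
theorem NewPeriodDoubling_spec : Claim_equal_NewPeriodDoubling := by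
  intro Seed N _
  unfold Spec_NewPeriodDoubling NewPeriodDoubling
  exact pvNPDA_eq_alt Seed N
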